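-- pv_equiv track=rewrite | github.com/sramsrin/coin-tracker | mapEditingTool/extract_tanjore.py | get_boundary
-- ===== SOURCE A (Python) =====
-- def get_boundary(pixels_set):
--     boundary = set()
--     for x, y in pixels_set:
--         for dx, dy in [(-1, 0), (1, 0), (0, -1), (0, 1)]:
--             if (x + dx, y + dy) not in pixels_set:
--                 boundary.add((x, y))
--                 break
--     return boundary
-- ===== SOURCE B (Python) =====
-- def get_boundary(pixels_set):
--     ps = set(pixels_set)
--     interior = ps
--     for dx, dy in [(-1, 0), (1, 0), (0, -1), (0, 1)]:
--         interior = interior & {(px - dx, py - dy) for (px, py) in ps}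
--     return ps - interior
-- ===== Notes on version B (the rewrite author's own statement) =====
-- stated objective: alternative
-- what changed: Replaces the per-pixel neighbor scan with an early break by set algebra: intersect the pixel set with its four shifted copies to get the interior, then return pixels minus interior.
import Mathlib
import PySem

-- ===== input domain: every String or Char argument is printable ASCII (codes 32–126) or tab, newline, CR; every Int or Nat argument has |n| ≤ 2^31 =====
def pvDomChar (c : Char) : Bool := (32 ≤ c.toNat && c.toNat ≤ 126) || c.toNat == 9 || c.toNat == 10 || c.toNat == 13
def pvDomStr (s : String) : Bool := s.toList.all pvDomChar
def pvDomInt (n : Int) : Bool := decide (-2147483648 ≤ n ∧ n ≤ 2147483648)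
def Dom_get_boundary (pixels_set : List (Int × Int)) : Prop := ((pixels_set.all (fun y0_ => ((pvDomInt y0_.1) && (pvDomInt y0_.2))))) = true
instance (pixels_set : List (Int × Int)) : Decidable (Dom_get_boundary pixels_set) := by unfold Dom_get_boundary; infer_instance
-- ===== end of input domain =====

-- B replaces A's per-pixel neighbor scan (with early break) by set algebra:
-- interior = pixels ∩ four shifted copies; boundary = pixels − interior. Alternative algorithm, return value only.


-- ===== PORT A =====
-- the inner 'for dx, dy in …: if …: add; break' loop, transliterated as a recursion over the direction list
def neighborMissing (pixels_set : List (Int × Int)) (x y : Int) : List (Int × Int) → Bool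
  | [] => false
  | (dx, dy) :: rest =>
    if !pixels_set.contains (x + dx, y + dy) then true
    else neighborMissing pixels_set x y rest

def get_boundary (pixels_set : List (Int × Int)) : List (Int × Int) :=
  pixels_set.foldl (fun boundary p =>
    if neighborMissing pixels_set p.1 p.2 [(-1, 0), (1, 0), (0, -1), (0, 1)]
    then PySem.Set.add boundary p else boundary) PySem.Set.empty

-- ===== PORT B =====
def get_boundary_alt (pixels_set : List (Int × Int)) : List (Int × Int) :=
  let ps := PySem.Set.ofList pixels_set
  let interior := [((-1 : Int), (0 : Int)), (1, 0), (0, -1), (0, 1)].foldl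
    (fun interior d =>
      PySem.Set.inter interior (PySem.Set.ofList (ps.map (fun p => (p.1 - d.1, p.2 - d.2))))) ps
  PySem.Set.diff ps interior

-- ===== PRECONDITION & SPEC =====
def Spec_get_boundary (pixels_set : List (Int × Int)) (out : List (Int × Int)) : Prop := out = get_boundary_alt pixels_set
instance (pixels_set : List (Int × Int)) (out : List (Int × Int)) : Decidable (Spec_get_boundary pixels_set out) := by unfold Spec_get_boundary; infer_instance

-- ===== CLAIM (what is proved, stated in full; the proofs are below) =====
def Claim_equal_get_boundary : Prop := ∀ (pixels_set : List (Int × Int)), Dom_get_boundary pixels_set → Spec_get_boundary pixels_set (get_boundary pixels_set)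

-- ===== LEMMAS AND PROOFS =====

-- filtering commutes with Set.add
theorem pv_filter_add {α : Type} [BEq α] [LawfulBEq α] (c : α → Bool) (s : PySem.Set α) (x : α) :
    List.filter c (PySem.Set.add s x) = if c x then PySem.Set.add (List.filter c s) x else List.filter c s := by
  by_cases hc : c x = true
  · rw [if_pos hc]
    unfold PySem.Set.add
    by_cases hx : s.contains x = true
    · have h2 : PySem.Set.contains (List.filter c s) x = true := by
        rw [PySem.Set.contains_iff _ _, List.mem_filter]
        exact ⟨(PySem.Set.contains_iff _ _).mp hx, hc⟩
      rw [if_pos hx, if_pos h2]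
    · have h2 : ¬ PySem.Set.contains (List.filter c s) x = true := by
        intro h
        exact hx ((PySem.Set.contains_iff _ _).mpr (List.mem_filter.mp ((PySem.Set.contains_iff _ _).mp h)).1)
      rw [if_neg hx, if_neg h2, List.filter_append]
      simp [hc]
  · rw [if_neg hc]
    unfold PySem.Set.add
    by_cases hx : s.contains x = true
    · rw [if_pos hx]
    · rw [if_neg hx, List.filter_append]
      simp [hc]

-- filtering commutes with building a set by repeated add
theorem pv_filter_foldl_add {α : Type} [BEq α] [LawfulBEq α] (c : α → Bool) :
    ∀ (l : List α) (s : PySem.Set α),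
      List.foldl PySem.Set.add (List.filter c s) (List.filter c l) = List.filter c (List.foldl PySem.Set.add s l)
  | [], s => rfl
  | x :: l, s => by
    by_cases hc : c x = true
    · rw [List.filter_cons_of_pos hc, List.foldl_cons, List.foldl_cons,
        ← pv_filter_foldl_add c l (PySem.Set.add s x), pv_filter_add, if_pos hc]
    · rw [List.filter_cons_of_neg hc, List.foldl_cons,
        ← pv_filter_foldl_add c l (PySem.Set.add s x), pv_filter_add, if_neg hc]

theorem pv_ofList_filter {α : Type} [BEq α] [LawfulBEq α] (c : α → Bool) (l : List α) :
    PySem.Set.ofList (List.filter c l) = List.filter c (PySem.Set.ofList l) := by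
  have := pv_filter_foldl_add c l PySem.Set.empty
  simpa [PySem.Set.ofList_eq_foldl, PySem.Set.empty] using this

-- membership in a shifted copy of the pixel set
theorem pv_mem_shift (ps : List (Int × Int)) (dx dy : Int) (p : Int × Int) :
    p ∈ ps.map (fun q => (q.1 - dx, q.2 - dy)) ↔ (p.1 + dx, p.2 + dy) ∈ ps := by
  rw [List.mem_map]
  constructor
  · rintro ⟨q, hq, rfl⟩
    simpa [show q.1 - dx + dx = q.1 by ring, show q.2 - dy + dy = q.2 by ring] using hq
  · intro h
    exact ⟨(p.1 + dx, p.2 + dy), h, by simp⟩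

-- membership in B's interior set
theorem pv_mem_interior (l : List (Int × Int)) (p : Int × Int) :
    p ∈ [((-1 : Int), (0 : Int)), (1, 0), (0, -1), (0, 1)].foldl
        (fun interior d =>
          PySem.Set.inter interior
            (PySem.Set.ofList ((PySem.Set.ofList l).map (fun p => (p.1 - d.1, p.2 - d.2))))) (PySem.Set.ofList l)
      ↔ p ∈ l ∧ (p.1 + -1, p.2 + 0) ∈ l ∧ (p.1 + 1, p.2 + 0) ∈ l ∧
          (p.1 + 0, p.2 + -1) ∈ l ∧ (p.1 + 0, p.2 + 1) ∈ l := by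
  simp only [List.foldl_cons, List.foldl_nil, PySem.Set.inter, List.mem_filter,
    PySem.Set.contains_iff, PySem.Set.mem_ofList, pv_mem_shift]
  tauto

-- A's inner-loop condition, characterised
theorem pv_neighborMissing_iff (l : List (Int × Int)) (x y : Int) :
    neighborMissing l x y [(-1, 0), (1, 0), (0, -1), (0, 1)] = true ↔
      ¬((x + -1, y) ∈ l ∧ (x + 1, y) ∈ l ∧ (x, y + -1) ∈ l ∧ (x, y + 1) ∈ l) := by
  simp only [neighborMissing, Bool.if_true_left]
  simp
  tauto

theorem get_boundary_eq_filter (l : List (Int × Int)) :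
    get_boundary l = List.filter
      (fun p => neighborMissing l p.1 p.2 [(-1, 0), (1, 0), (0, -1), (0, 1)]) (PySem.Set.ofList l) := by
  unfold get_boundary
  rw [← pv_ofList_filter, PySem.Set.ofList_eq_foldl, List.foldl_filter]
  rfl

-- ===== VERDICT (by name: the statement is the Claim_ definition above) =====
theorem get_boundary_spec : Claim_equal_get_boundary := by
  intro l _
  show get_boundary l = get_boundary_alt l
  rw [get_boundary_eq_filter]
  unfold get_boundary_alt
  simp only [PySem.Set.diff]
  apply List.filter_congr
  intro p hp
  have hpl : p ∈ l := (PySem.Set.mem_ofList l p).mp hp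
  rw [Bool.eq_iff_iff, pv_neighborMissing_iff]
  simp only [Bool.not_eq_true', Bool.eq_false_iff, ne_eq,
    PySem.Set.contains_eq_listContains, List.contains_iff_mem]
  rw [pv_mem_interior]
  simp only [add_zero]
  tauto
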